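-- pv_equiv track=rewrite | github.com/desmondanh/python_study | CowsAndBulls.py | cow_bull
-- ===== SOURCE A (Python) =====
-- def cow_bull(number, user_guess):
--     cowbull = [0,0] #cows, then bulls count
--     for i in range(len(number)):
--         if number[i] == user_guess[i]:
--             cowbull[0]+=1
--         elif user_guess[i] in number:
--             cowbull[1]+=1
--     return cowbull
-- ===== SOURCE B (Python) =====
-- def cow_bull(number, user_guess):
--     prefix = [user_guess[i] for i in range(len(number))]
--     cows = sum(a == g for a, g in zip(number, prefix))
--     hits = sum(prefix.count(c) for c in set(number))
--     return [cows, hits - cows]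
-- ===== Notes on version B (the rewrite author's own statement) =====
-- stated objective: alternative
-- what changed: Bulls are no longer counted by a per-position membership test: B counts cows over zipped pairs, counts all guessed-digit hits by summing prefix.count(c) over the distinct characters of the secret, and derives bulls as hits - cows (a positional match is always a hit), eliminating A's elif branch and its inequality/membership guard.
import Mathlib
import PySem

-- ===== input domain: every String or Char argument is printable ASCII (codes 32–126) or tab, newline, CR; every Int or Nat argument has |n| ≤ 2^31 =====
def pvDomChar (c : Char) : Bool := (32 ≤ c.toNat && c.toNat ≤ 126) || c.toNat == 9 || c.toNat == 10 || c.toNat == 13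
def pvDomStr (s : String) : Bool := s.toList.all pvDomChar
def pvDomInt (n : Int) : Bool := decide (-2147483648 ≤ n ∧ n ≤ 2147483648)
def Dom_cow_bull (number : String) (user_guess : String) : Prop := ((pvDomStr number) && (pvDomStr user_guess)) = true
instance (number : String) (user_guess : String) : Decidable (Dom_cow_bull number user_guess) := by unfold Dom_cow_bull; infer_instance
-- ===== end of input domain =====

-- B drops A's interleaved if/elif pass: it counts cows over zipped pairs and derives bulls
-- as (total hits over the distinct secret characters) minus cows; return-value equivalence
-- on guesses at least as long as the secret.

-- ===== PORT A =====
-- A's loop body: reads number[i] and user_guess[i] (pyGet?; none = IndexError, excluded by Pre_),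
-- increments cows on equality, else increments bulls when the guessed char occurs in number.
def cowBullStep (number : String) (user_guess : String) (cb : Int × Int) (i : Int) : Int × Int :=
  match PySem.Str.pyGet? number i, PySem.Str.pyGet? user_guess i with
  | some a, some b =>
      if a == b then (cb.1 + 1, cb.2)
      else if number.toList.contains b then (cb.1, cb.2 + 1)
      else cb
  | _, _ => cb   -- unreachable inside Pre_: Python raises IndexError here

def cow_bull (number : String) (user_guess : String) : List Int :=
  let cb : Int × Int :=
    (PySem.List.pyRange 0 (PySem.Str.len number) 1).foldl (cowBullStep number user_guess) (0, 0)
  [cb.1, cb.2]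

-- ===== PORT B =====
def cow_bull_alt (number : String) (user_guess : String) : List Int :=
  -- prefix = [user_guess[i] for i in range(len(number))]  (getD ' ' is the none = IndexError case, excluded by Pre_)
  let guessPrefix : List Char :=
    (PySem.List.pyRange 0 (PySem.Str.len number) 1).map
      (fun i => (PySem.Str.pyGet? user_guess i).getD ' ')
  -- cows = sum(a == g for a, g in zip(number, prefix))
  let cows : Int :=
    ((number.toList.zip guessPrefix).map (fun p => if p.1 == p.2 then (1 : Int) else 0)).sum
  -- hits = sum(prefix.count(c) for c in set(number))  (a sum over a PySem.Set: order-independent)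
  let hits : Int :=
    ((PySem.Set.ofList number.toList).map (fun c => (PySem.List.count guessPrefix c : Int))).sum
  [cows, hits - cows]

-- ===== PRECONDITION & SPEC =====
-- Pre_ excludes exactly the inputs where the guess is shorter than the secret: there both A and B
-- raise IndexError reading user_guess[i].
def Pre_cow_bull (number : String) (user_guess : String) : Prop :=
  number.toList.length ≤ user_guess.toList.length
instance (number : String) (user_guess : String) : Decidable (Pre_cow_bull number user_guess) := by unfold Pre_cow_bull; infer_instance

def pvWitness_cow_bull : String × String := ("123", "132")

def Spec_cow_bull (number : String) (user_guess : String) (out : List Int) : Prop := out = cow_bull_alt number user_guess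
instance (number : String) (user_guess : String) (out : List Int) : Decidable (Spec_cow_bull number user_guess out) := by unfold Spec_cow_bull; infer_instance

-- ===== CLAIM (what is proved, stated in full; the proofs are below) =====
def Claim_equal_cow_bull : Prop := ∀ (number : String) (user_guess : String), Dom_cow_bull number user_guess → Pre_cow_bull number user_guess → Spec_cow_bull number user_guess (cow_bull number user_guess)

-- ===== LEMMAS AND PROOFS =====

-- 0/1 indicator of positional equality at index k
def pvEqTerm (nl gl : List Char) (k : Nat) : Int := if nl.getD k ' ' == gl.getD k ' ' then 1 else 0
-- 0/1 indicator of "guessed char at k occurs in the secret"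
def pvMemTerm (nl gl : List Char) (k : Nat) : Int := if gl.getD k ' ' ∈ nl then 1 else 0

-- summing the equality indicator over a duplicate-free list is a membership test
theorem pv_sum_indicator (x : Char) : ∀ (s : List Char), s.Nodup →
    (s.map (fun c => if c == x then (1 : Int) else 0)).sum = if x ∈ s then 1 else 0 := by
  intro s
  induction s with
  | nil => simp
  | cons a s ih =>
      intro hnd
      rcases List.nodup_cons.mp hnd with ⟨ha, hs⟩
      by_cases hax : a = x
      · subst hax
        have h0 : ∀ c ∈ s, (if c == a then (1 : Int) else 0) = (fun _ => (0 : Int)) c :=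
          fun c hc => by simp [show c ≠ a from fun h => ha (h ▸ hc)]
        rw [List.map_cons, List.sum_cons, List.map_congr_left h0]
        simp
      · have hxa : ¬(x = a) := fun h => hax h.symm
        simp only [List.map_cons, List.sum_cons, ih hs, List.mem_cons]
        have : (a == x) = false := by simp [hax]
        simp [this, hxa]

-- sum of per-character counts over a duplicate-free character list counts the members positionally
theorem pv_sum_count (s : List Char) (hs : s.Nodup) : ∀ (p : List Char),
    (s.map (fun c => (PySem.List.count p c : Int))).sum =
      (p.map (fun x => if x ∈ s then (1 : Int) else 0)).sum := by
  intro p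
  induction p with
  | nil => simp [PySem.List.count]
  | cons x t ih =>
      have hcount : ∀ c ∈ s, (PySem.List.count (x :: t) c : Int) =
          (fun c => (PySem.List.count t c : Int) + (if c == x then (1 : Int) else 0)) c := by
        intro c _
        simp only [PySem.List.count_eq, List.count_cons]
        by_cases h : c = x
        · simp [h]
        · simp [h, Ne.symm h]
      rw [List.map_congr_left hcount, List.sum_map_add, ih, pv_sum_indicator x s hs,
        List.map_cons, List.sum_cons]
      ring

-- A's interleaved fold over range(0, m) equals (cows, hits - cows) componentwise
theorem pv_foldA (number user_guess : String)
    (hpre : number.toList.length ≤ user_guess.toList.length) :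
    ∀ (m : Nat), m ≤ number.toList.length → ∀ (c b : Int),
      (PySem.List.pyRange 0 (m : Int) 1).foldl (cowBullStep number user_guess) (c, b) =
        (c + ((List.range m).map (pvEqTerm number.toList user_guess.toList)).sum,
         b + (((List.range m).map (pvMemTerm number.toList user_guess.toList)).sum
              - ((List.range m).map (pvEqTerm number.toList user_guess.toList)).sum)) := by
  intro m
  induction m with
  | zero => intro _ c b; simp
  | succ m ih =>
      intro hm c b
      have hm' : m ≤ number.toList.length := Nat.le_of_succ_le hm
      have hmn : m < number.toList.length := hm
      have hmg : m < user_guess.toList.length := lt_of_lt_of_le hmn hpre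
      have hcast : ((m + 1 : Nat) : Int) = (m : Int) + 1 := by push_cast; ring
      rw [hcast, PySem.List.pyRange_one_succ_right (by exact_mod_cast Nat.zero_le m)]
      rw [List.foldl_append, ih hm' c b]
      rw [List.range_succ, List.map_append, List.map_append, List.sum_append, List.sum_append]
      simp only [List.foldl_cons, List.foldl_nil, List.map_cons, List.map_nil,
        List.sum_cons, List.sum_nil]
      unfold cowBullStep pvEqTerm pvMemTerm
      simp only [PySem.Str.pyGet?_natCast, List.getElem?_eq_getElem hmn,
        List.getElem?_eq_getElem hmg, List.getD_eq_getElem _ _ hmn, List.getD_eq_getElem _ _ hmg]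
      by_cases heq : number.toList[m] = user_guess.toList[m]
      · have hmem : user_guess.toList[m] ∈ number.toList := heq ▸ List.getElem_mem hmn
        simp only [heq, BEq.rfl, if_pos, hmem, Prod.ext_iff]
        constructor <;> ring
      · have hne : (number.toList[m] == user_guess.toList[m]) = false := by simp [heq]
        by_cases hmem : user_guess.toList[m] ∈ number.toList
        · simp only [hne, Bool.false_eq_true, if_false, List.contains_eq_mem, hmem,
            decide_true, ite_true, Prod.ext_iff]
          constructor <;> ring
        · simp only [hne, Bool.false_eq_true, if_false, List.contains_eq_mem, hmem,
            decide_false, ite_false, Prod.ext_iff]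
          constructor <;> ring

-- B's prefix list, in indexed form (no side condition: getD absorbs the option)
theorem pv_prefix_eq (number user_guess : String) :
    (PySem.List.pyRange 0 (PySem.Str.len number) 1).map
        (fun i => (PySem.Str.pyGet? user_guess i).getD ' ')
      = (List.range number.toList.length).map (fun k => user_guess.toList.getD k ' ') := by
  simp only [PySem.Str.len_eq, PySem.List.pyRange_one, sub_zero, Int.toNat_natCast,
    List.map_map]
  refine List.map_congr_left (fun k _ => ?_)
  simp [List.getD_eq_getElem?_getD]

-- zipping a list with the indexed image of another is an indexed list of pairs
theorem pv_zip_eq (nl gl : List Char) :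
    nl.zip ((List.range nl.length).map (fun k => gl.getD k ' '))
      = (List.range nl.length).map (fun k => (nl.getD k ' ', gl.getD k ' ')) := by
  refine List.ext_getElem (by simp) ?_
  intro k h1 h2
  have hk : k < nl.length := by simpa using h2
  simp [List.getElem_zip, List.getD_eq_getElem?_getD, List.getElem?_eq_getElem hk]

-- ===== VERDICT (by name: the statement is the Claim_ definition above) =====
theorem cow_bull_spec : Claim_equal_cow_bull := by
  intro number user_guess _ hpre
  unfold Spec_cow_bull cow_bull cow_bull_alt
  rw [pv_prefix_eq number user_guess]
  have hfold := pv_foldA number user_guess hpre number.toList.length (le_refl _) 0 0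
  simp only [PySem.Str.len_eq] at hfold ⊢
  rw [hfold, pv_zip_eq number.toList user_guess.toList,
    pv_sum_count (PySem.Set.ofList number.toList) (PySem.Set.nodup_ofList number.toList)]
  simp only [List.map_map, Function.comp_def]
  unfold pvEqTerm pvMemTerm
  simp [PySem.Set.mem_ofList]
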